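-- pv_equiv track=rewrite | github.com/PeshangALO/Learning_Systems | Assignment_2/main_2.py | evaluate_condition
-- ===== SOURCE A (Python) =====
-- def evaluate_condition(observation, condition):
--     truth_value_of_condition = True
--     for feature in observation:
--         if feature in condition and observation[feature] == False:
--             truth_value_of_condition = False
--             break
--         if 'NOT ' + feature in condition and observation[feature] == True:
--             truth_value_of_condition = False
--             break
--     return truth_value_of_condition
-- ===== SOURCE B (Python) =====
-- def evaluate_condition(observation, condition):
--     # Evaluate the conjunction clause-by-clause over `condition` instead of
--     # scanning the observation's features.
--     return not any(
--         (e in observation and observation[e] == False)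
--         or (e.startswith('NOT ') and e[4:] in observation and observation[e[4:]] == True)
--         for e in condition
--     )
-- ===== Notes on version B (the rewrite author's own statement) =====
-- stated objective: alternative
-- what changed: B iterates over the condition's clauses and evaluates each clause directly (plain and 'NOT '-stripped lookups into the observation dict), instead of A's loop over the observation's features testing set membership of the feature and its negation.
import Mathlib
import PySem

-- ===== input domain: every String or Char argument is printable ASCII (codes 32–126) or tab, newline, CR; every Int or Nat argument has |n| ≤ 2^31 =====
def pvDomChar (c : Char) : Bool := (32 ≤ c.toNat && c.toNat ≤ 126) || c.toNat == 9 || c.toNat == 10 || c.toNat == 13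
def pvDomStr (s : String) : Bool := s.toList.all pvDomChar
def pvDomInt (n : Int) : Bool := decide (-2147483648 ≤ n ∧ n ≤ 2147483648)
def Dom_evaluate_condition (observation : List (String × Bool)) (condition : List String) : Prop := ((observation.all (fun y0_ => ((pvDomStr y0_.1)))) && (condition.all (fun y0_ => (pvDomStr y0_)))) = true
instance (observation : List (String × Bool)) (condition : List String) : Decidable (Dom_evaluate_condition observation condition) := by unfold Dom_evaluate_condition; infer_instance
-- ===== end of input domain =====

-- B re-evaluates the conjunction clause-by-clause over `condition` (plain and
-- 'NOT '-stripped dict lookups) instead of A's loop over the observation's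
-- features; same return value, objective: alternative decomposition.

-- ===== PORT A =====
-- A loops over the observation's features (dict iteration = key of each pair,
-- in order), with `observation[feature]` a dict lookup = first match, and
-- breaks as soon as the truth value is falsified.
def evaluate_condition_goA (observation : List (String × Bool)) (condition : List String) : List (String × Bool) → Bool
  | [] => true
  | (feature, _) :: rest =>
    if condition.contains feature && (observation.lookup feature == some false) then
      false
    else if condition.contains ("NOT " ++ feature) && (observation.lookup feature == some true) then
      false
    else evaluate_condition_goA observation condition rest

def evaluate_condition (observation : List (String × Bool)) (condition : List String) : Bool :=
  evaluate_condition_goA observation condition observation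

-- ===== PORT B =====
-- B: `not any(clause falsified for clause in condition)`.
def evaluate_condition_alt (observation : List (String × Bool)) (condition : List String) : Bool :=
  !(condition.any (fun e =>
      (observation.lookup e == some false)
      || (PySem.Str.startswith e "NOT "
            && (observation.lookup (PySem.Str.slice e (some 4) none) == some true))))

-- ===== PRECONDITION & SPEC =====
def Spec_evaluate_condition (observation : List (String × Bool)) (condition : List String) (out : Bool) : Prop := out = evaluate_condition_alt observation condition
instance (observation : List (String × Bool)) (condition : List String) (out : Bool) : Decidable (Spec_evaluate_condition observation condition out) := by unfold Spec_evaluate_condition; infer_instance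

-- ===== CLAIM (what is proved, stated in full; the proofs are below) =====
def Claim_equal_evaluate_condition : Prop := ∀ (observation : List (String × Bool)) (condition : List String), Dom_evaluate_condition observation condition → Spec_evaluate_condition observation condition (evaluate_condition observation condition)

-- ===== LEMMAS AND PROOFS =====

-- association-list lookup: success gives membership of the found pair
theorem pv_mem_of_lookup {l : List (String × Bool)} {k : String} {v : Bool}
    (h : l.lookup k = some v) : (k, v) ∈ l := by
  induction l with
  | nil => simp [List.lookup] at h
  | cons p t ih =>
      rw [List.lookup_cons] at h
      split at h
      · next he => simp at he; cases h; simp [he]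
      · simp [ih h]

-- 'NOT ' + (e[4:]) reassembles e when e starts with 'NOT '
theorem pv_not_reassemble (e : String) (h : PySem.Str.startswith e "NOT " = true) :
    "NOT " ++ PySem.Str.slice e (some 4) none = e := by
  apply String.toList_inj.mp
  simp [pysem] at h ⊢
  obtain ⟨t, ht⟩ := h
  rw [← ht]
  simp

-- ('NOT ' + f)[4:] = f
theorem pv_slice_not (f : String) :
    PySem.Str.slice ("NOT " ++ f) (some 4) none = f := by
  apply String.toList_inj.mp
  simp [pysem]

-- 'NOT ' + f starts with 'NOT '
theorem pv_startswith_not (f : String) :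
    PySem.Str.startswith ("NOT " ++ f) "NOT " = true := by
  simp [pysem]

-- A's loop is the negated existential over the remaining features
theorem pv_goA_eq_any (observation : List (String × Bool)) (condition : List String)
    (rest : List (String × Bool)) :
    evaluate_condition_goA observation condition rest =
      !(rest.any (fun p =>
          (condition.contains p.1 && (observation.lookup p.1 == some false))
          || (condition.contains ("NOT " ++ p.1) && (observation.lookup p.1 == some true)))) := by
  induction rest with
  | nil => rfl
  | cons p t ih =>
      obtain ⟨f, v⟩ := p
      rw [evaluate_condition_goA, List.any_cons]
      split_ifs with h1 h2
      · simp only [h1, Bool.true_or, Bool.not_true]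
      · rw [Bool.not_eq_true] at h1
        simp only [h1, h2, Bool.false_or, Bool.true_or, Bool.not_true]
      · rw [Bool.not_eq_true] at h1 h2
        simp only [h1, h2, Bool.false_or, ih]

-- the two existentials coincide
theorem pv_any_eq (observation : List (String × Bool)) (condition : List String) :
    (observation.any (fun p =>
        (condition.contains p.1 && (observation.lookup p.1 == some false))
        || (condition.contains ("NOT " ++ p.1) && (observation.lookup p.1 == some true))))
    = (condition.any (fun e =>
        (observation.lookup e == some false)
        || (PySem.Str.startswith e "NOT "
              && (observation.lookup (PySem.Str.slice e (some 4) none) == some true)))) := by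
  rw [Bool.eq_iff_iff]
  simp only [List.any_eq_true, Bool.or_eq_true, Bool.and_eq_true, List.contains_iff_mem,
    beq_iff_eq]
  constructor
  · rintro ⟨⟨f, v⟩, hmem, (⟨hc, hl⟩ | ⟨hc, hl⟩)⟩
    · exact ⟨f, hc, Or.inl hl⟩
    · exact ⟨"NOT " ++ f, hc, Or.inr ⟨pv_startswith_not f, by rw [pv_slice_not]; exact hl⟩⟩
  · rintro ⟨e, hmem, (hl | ⟨hsw, hl⟩)⟩
    · exact ⟨(e, false), pv_mem_of_lookup hl, Or.inl ⟨hmem, hl⟩⟩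
    · refine ⟨(PySem.Str.slice e (some 4) none, true), pv_mem_of_lookup hl, Or.inr ⟨?_, hl⟩⟩
      rwa [pv_not_reassemble e hsw]

-- ===== VERDICT (by name: the statement is the Claim_ definition above) =====
theorem evaluate_condition_spec : Claim_equal_evaluate_condition := by
  intro observation condition _
  unfold Spec_evaluate_condition evaluate_condition evaluate_condition_alt
  rw [pv_goA_eq_any, pv_any_eq]
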